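-- pv_equiv track=rewrite | github.com/mauwie1/TranscriptClassifier | TextHandler.py | smallSentenceFilter
-- ===== SOURCE A (Python) =====
-- def smallSentenceFilter(tuplelist, length):
--     counter=0
--     while counter<len(tuplelist):
--         sentencetuple = tuplelist[counter]
--         splitsentence = sentencetuple[0].split(' ')
--         counter2=0
--         while counter2<len(splitsentence):
--             try:
--                 splitsentence.remove('')
--             except:
--                 pass
--             counter2+=1
--         if len(splitsentence)<length:
--             del tuplelist[counter]
--             counter-=1
--         counter+=1
--     return tuplelist
-- ===== SOURCE B (Python) =====
-- def smallSentenceFilter(tuplelist, length):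
--     # Keep tuples whose sentence has at least `length` words; filter in place.
--     kept = [t for t in tuplelist if sum(1 for w in t[0].split(' ') if w) >= length]
--     tuplelist[:] = kept
--     return tuplelist
-- ===== Notes on version B (the rewrite author's own statement) =====
-- stated objective: simpler
-- what changed: A's in-place del-while-scanning loop with a nested (buggy, truncated) remove('') while-loop is replaced by one filtering pass that counts nonempty words; Pre_ excludes lists containing an empty inner tuple, on which A raises IndexError at sentencetuple[0].
-- intended difference: On lists containing a tuple whose sentence splits into more empty strings than ceil(L/2) (heavy runs of spaces) with length in the gap, A's truncated remove('') loop stops early and keeps the tuple although it has fewer than `length` real words; B drops it, which is the intended word-count filter. — e.g. on smallSentenceFilter([[" ", "x"]], 1): A returns [[" ", "x"]], B returns []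
import Mathlib
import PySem

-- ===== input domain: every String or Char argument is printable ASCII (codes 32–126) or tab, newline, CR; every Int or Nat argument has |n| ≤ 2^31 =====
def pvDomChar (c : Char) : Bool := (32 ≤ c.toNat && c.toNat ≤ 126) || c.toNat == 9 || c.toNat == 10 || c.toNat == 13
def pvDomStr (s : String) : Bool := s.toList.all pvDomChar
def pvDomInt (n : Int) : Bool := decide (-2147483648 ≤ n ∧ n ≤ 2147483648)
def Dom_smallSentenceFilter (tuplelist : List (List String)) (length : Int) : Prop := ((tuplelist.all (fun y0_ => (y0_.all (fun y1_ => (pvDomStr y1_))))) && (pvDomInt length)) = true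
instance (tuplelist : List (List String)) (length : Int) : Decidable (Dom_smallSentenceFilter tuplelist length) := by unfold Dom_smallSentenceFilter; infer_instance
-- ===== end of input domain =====

-- B is one filtering pass counting nonempty words (simpler); A's truncated remove('') loop is an
-- evident bug on space-heavy sentences, stated below as an intended difference D_. Both Pythons
-- mutate tuplelist in place to the same returned list; the equivalence proved is about the return value.

-- ===== PORT A =====
-- inner 'while counter2 < len(splitsentence): try remove('') except pass; counter2 += 1'
-- (fuel = remaining loop iterations, a termination guard only: ss.length - c2 decreases each step)
def innerA (fuel : Nat) (ss : List String) (c2 : Nat) : List String :=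
  match fuel with
  | 0 => ss
  | f + 1 =>
    if c2 < ss.length then
      match PySem.List.remove? ss "" with
      | some ss' => innerA f ss' (c2 + 1)
      | none => innerA f ss (c2 + 1)
    else ss

-- outer 'while counter < len(tuplelist): …' with 'del tuplelist[counter]; counter -= 1' folded
-- (fuel = remaining iterations: tl.length - counter decreases each step)
def outerA (fuel : Nat) (tl : List (List String)) (counter : Nat) (length : Int) : List (List String) :=
  match fuel with
  | 0 => tl
  | f + 1 =>
    if counter < tl.length then
      let sentencetuple := (PySem.List.pyGet? tl (counter : Int)).getD []
      let splitsentence := (PySem.Str.split? ((PySem.List.pyGet? sentencetuple (0 : Int)).getD "") " ").getD []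
      let ss2 := innerA splitsentence.length splitsentence 0
      if (ss2.length : Int) < length then
        outerA f (tl.eraseIdx counter) counter length
      else
        outerA f tl (counter + 1) length
    else tl

def smallSentenceFilter (tuplelist : List (List String)) (length : Int) : List (List String) :=
  outerA tuplelist.length tuplelist 0 length

-- ===== PORT B =====
def keepB (length : Int) (t : List String) : Bool :=
  let words := (PySem.Str.split? ((PySem.List.pyGet? t (0 : Int)).getD "") " ").getD []
  decide (length ≤ ((words.countP (fun w => w ≠ "")) : Int))

def smallSentenceFilter_alt (tuplelist : List (List String)) (length : Int) : List (List String) :=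
  tuplelist.filter (keepB length)

-- ===== PRECONDITION & SPEC =====
-- Pre_ excludes lists containing an empty inner tuple: there Python A raises IndexError on sentencetuple[0].
def Pre_smallSentenceFilter (tuplelist : List (List String)) (length : Int) : Prop :=
  ∀ t ∈ tuplelist, t ≠ []
instance (tuplelist : List (List String)) (length : Int) : Decidable (Pre_smallSentenceFilter tuplelist length) := by unfold Pre_smallSentenceFilter; infer_instance
def pvWitness_smallSentenceFilter : List (List String) × Int := ([["a b c", "1"], ["", "2"]], 2)

-- a tuple whose sentence splits into more empty parts than ceil(L/2), with `length` in the gap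
-- that A's truncated remove('') loop leaves open
def badT (length : Int) (t : List String) : Bool :=
  let ws := (PySem.Str.split? ((PySem.List.pyGet? t (0 : Int)).getD "") " ").getD []
  decide ((ws.length + 1) / 2 < ws.count "" ∧
    (ws.length : Int) - (ws.count "" : Int) < length ∧
    length ≤ (ws.length : Int) - (((ws.length + 1) / 2 : Nat) : Int))

-- On lists containing a tuple whose sentence splits into more empty strings than ceil(L/2)
-- (heavy runs of spaces) with `length` in the gap, A's truncated remove('') loop stops early and
-- keeps the tuple although it has fewer than `length` real words; B drops it, the intended filter.
def D_smallSentenceFilter (tuplelist : List (List String)) (length : Int) : Prop :=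
  ∃ t ∈ tuplelist, badT length t = true
instance (tuplelist : List (List String)) (length : Int) : Decidable (D_smallSentenceFilter tuplelist length) := by unfold D_smallSentenceFilter; infer_instance

def Spec_smallSentenceFilter (tuplelist : List (List String)) (length : Int) (out : List (List String)) : Prop := ¬ D_smallSentenceFilter tuplelist length → out = smallSentenceFilter_alt tuplelist length
instance (tuplelist : List (List String)) (length : Int) (out : List (List String)) : Decidable (Spec_smallSentenceFilter tuplelist length out) := by unfold Spec_smallSentenceFilter; infer_instance

def pvDiffWitness_smallSentenceFilter : List (List String) × Int := ([[" ", "x"]], 1)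
def pvDiffWitnessOut_smallSentenceFilter : (List (List String)) × (List (List String)) := ([[" ", "x"]], [])

-- ===== CLAIM (what is proved, stated in full; the proofs are below) =====
def Claim_unchanged_smallSentenceFilter : Prop := ∀ (tuplelist : List (List String)) (length : Int), Dom_smallSentenceFilter tuplelist length → Pre_smallSentenceFilter tuplelist length → Spec_smallSentenceFilter tuplelist length (smallSentenceFilter tuplelist length)
def Claim_changed_smallSentenceFilter : Prop := Dom_smallSentenceFilter (pvDiffWitness_smallSentenceFilter.1) (pvDiffWitness_smallSentenceFilter.2) ∧ Pre_smallSentenceFilter (pvDiffWitness_smallSentenceFilter.1) (pvDiffWitness_smallSentenceFilter.2) ∧ D_smallSentenceFilter (pvDiffWitness_smallSentenceFilter.1) (pvDiffWitness_smallSentenceFilter.2) ∧ smallSentenceFilter (pvDiffWitness_smallSentenceFilter.1) (pvDiffWitness_smallSentenceFilter.2) = pvDiffWitnessOut_smallSentenceFilter.1 ∧ smallSentenceFilter_alt (pvDiffWitness_smallSentenceFilter.1) (pvDiffWitness_smallSentenceFilter.2) = pvDiffWitnessOut_smallSentenceFilter.2 ∧ pvDiffWitnessOut_smallSentenceFilter.1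 ≠ pvDiffWitnessOut_smallSentenceFilter.2
def Claim_exact_smallSentenceFilter : Prop := ∀ (tuplelist : List (List String)) (length : Int), Dom_smallSentenceFilter tuplelist length → Pre_smallSentenceFilter tuplelist length → D_smallSentenceFilter tuplelist length → smallSentenceFilter tuplelist length ≠ smallSentenceFilter_alt tuplelist length

-- ===== LEMMAS AND PROOFS =====

-- A's effective keep predicate: the inner loop removes exactly min(#'' , ⌈L/2⌉) empty strings
def keepA (length : Int) (t : List String) : Bool :=
  let ws := (PySem.Str.split? ((PySem.List.pyGet? t (0 : Int)).getD "") " ").getD []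
  decide (length ≤ ((ws.length - min (ws.count "") ((ws.length + 1) / 2) : Nat) : Int))

lemma innerA_length : ∀ (fuel : Nat) (ss : List String) (c2 : Nat), ss.length - c2 ≤ fuel →
    (innerA fuel ss c2).length = ss.length - min (ss.count "") ((ss.length - c2 + 1) / 2) := by
  intro fuel
  induction fuel with
  | zero =>
    intro ss c2 hf
    simp only [innerA]
    omega
  | succ f ih =>
    intro ss c2 hf
    by_cases h : c2 < ss.length
    · rw [innerA, if_pos h]
      cases he : PySem.List.remove? ss "" with
      | some ss' =>
        have hm : "" ∈ ss := by
          by_contra hn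
          rw [(PySem.List.remove?_eq_none_iff ss "").mpr hn] at he
          simp at he
        have hss' : ss' = ss.erase "" := by
          have h2 := PySem.List.remove?_eq_some_erase ss "" hm
          rw [he] at h2
          exact (Option.some.inj h2)
        have hlen : ss'.length = ss.length - 1 := by
          rw [hss', List.length_erase_of_mem hm]
        have hcnt : ss'.count "" = ss.count "" - 1 := by
          rw [hss', List.count_erase_self]
        have hpos : 0 < ss.count "" := List.count_pos_iff.mpr hm
        rw [ih ss' (c2 + 1) (by omega)]
        omega
      | none =>
        have hn : "" ∉ ss := (PySem.List.remove?_eq_none_iff ss "").mp he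
        have hcnt : ss.count "" = 0 := List.count_eq_zero.mpr hn
        rw [ih ss (c2 + 1) (by omega)]
        omega
    · rw [innerA, if_neg h]
      omega

-- A's delete condition at a tuple is exactly ¬keepA
lemma condA (length : Int) (t : List String) :
    (((innerA ((PySem.Str.split? ((PySem.List.pyGet? t (0 : Int)).getD "") " ").getD []).length
        ((PySem.Str.split? ((PySem.List.pyGet? t (0 : Int)).getD "") " ").getD []) 0).length : Int) < length)
      ↔ keepA length t = false := by
  rw [innerA_length _ _ _ (by omega)]
  simp only [keepA, decide_eq_false_iff_not, not_le]
  omega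

-- nonempty-word count = length - count of '' (any list of strings)
lemma countP_nonempty (ws : List String) :
    ws.countP (fun w => w ≠ "") = ws.length - ws.count "" := by
  have hpred : (fun w : String => decide (w ≠ "")) = (fun a : String => decide ¬((a == "") = true)) := by
    funext w
    by_cases hw : w = "" <;> simp [hw]
  rw [List.count, hpred]
  have h := List.length_eq_countP_add_countP (p := fun w : String => w == "") (l := ws)
  omega

lemma keepA_eq_keepB (length : Int) (t : List String) (hb : badT length t = false) :
    keepA length t = keepB length t := by
  simp only [badT, decide_eq_false_iff_not, not_and, not_le] at hb
  simp only [keepA, keepB, countP_nonempty]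
  have hle := List.count_le_length (l := (PySem.Str.split? ((PySem.List.pyGet? t (0 : Int)).getD "") " ").getD []) (a := "")
  by_cases h1 : ((((PySem.Str.split? ((PySem.List.pyGet? t (0 : Int)).getD "") " ").getD []).length + 1) / 2 <
      ((PySem.Str.split? ((PySem.List.pyGet? t (0 : Int)).getD "") " ").getD []).count "")
  · have := hb h1
    by_cases h2 : keepA length t = true
    · simp only [keepA, decide_eq_true_eq] at h2
      simp only [decide_eq_decide]
      omega
    · simp only [keepA, decide_eq_true_eq, not_le] at h2
      simp only [decide_eq_decide]
      omega
  · simp only [decide_eq_decide]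
    omega

lemma badT_keep (length : Int) (t : List String) (hb : badT length t = true) :
    keepA length t = true ∧ keepB length t = false := by
  simp only [badT, decide_eq_true_eq] at hb
  have hle := List.count_le_length (l := (PySem.Str.split? ((PySem.List.pyGet? t (0 : Int)).getD "") " ").getD []) (a := "")
  constructor
  · simp only [keepA, decide_eq_true_eq]
    omega
  · simp only [keepB, countP_nonempty, decide_eq_false_iff_not, not_le]
    omega

lemma keepB_le_keepA (length : Int) (t : List String) (h : keepB length t = true) :
    keepA length t = true := by
  simp only [keepB, countP_nonempty, decide_eq_true_eq] at h
  simp only [keepA, decide_eq_true_eq]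
  have hle := List.count_le_length (l := (PySem.Str.split? ((PySem.List.pyGet? t (0 : Int)).getD "") " ").getD []) (a := "")
  omega

-- the outer loop is take-prefix ++ filter(keepA)-of-suffix
lemma outerA_eq (length : Int) : ∀ (fuel : Nat) (tl : List (List String)) (c : Nat), tl.length - c ≤ fuel →
    outerA fuel tl c length = tl.take c ++ (tl.drop c).filter (keepA length) := by
  intro fuel
  induction fuel with
  | zero =>
    intro tl c hf
    rw [outerA]
    have hle : tl.length ≤ c := by omega
    simp [List.take_of_length_le hle, List.drop_of_length_le hle]
  | succ f ih =>
    intro tl c hf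
    by_cases h : c < tl.length
    · rw [outerA, if_pos h]
      dsimp only
      have ht : (PySem.List.pyGet? tl (c : Int)).getD [] = tl[c] := by
        rw [PySem.List.pyGet?_natCast]
        simp [List.getElem?_eq_getElem h]
      rw [ht]
      have hdc : tl.drop c = tl[c] :: tl.drop (c + 1) := List.drop_eq_getElem_cons h
      by_cases hc : ((innerA ((PySem.Str.split? ((PySem.List.pyGet? tl[c] (0 : Int)).getD "") " ").getD []).length
          ((PySem.Str.split? ((PySem.List.pyGet? tl[c] (0 : Int)).getD "") " ").getD []) 0).length : Int) < length
      · -- delete branch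
        have hkeep : keepA length tl[c] = false := (condA length tl[c]).mp hc
        rw [if_pos hc, ih (tl.eraseIdx c) c (by have := List.length_eraseIdx_of_lt h; omega)]
        rw [List.eraseIdx_eq_take_drop_succ]
        have h1 : (tl.take c ++ tl.drop (c + 1)).take c = tl.take c := by
          rw [List.take_append_of_le_length (by simp [List.length_take]; omega)]
          simp [List.take_take]
        have h2 : (tl.take c ++ tl.drop (c + 1)).drop c = tl.drop (c + 1) := by
          rw [List.drop_append_of_le_length (by simp [List.length_take]; omega)]
          simp
        rw [h1, h2, hdc, List.filter_cons, hkeep]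
        simp
      · -- keep branch
        have hkeep : keepA length tl[c] = true := by
          by_contra hk
          exact hc ((condA length tl[c]).mpr (by simpa using hk))
        rw [if_neg hc, ih tl (c + 1) (by omega)]
        rw [hdc, List.filter_cons, hkeep]
        rw [List.take_add_one, List.getElem?_eq_getElem h]
        simp only [Option.toList_some, List.append_assoc, List.singleton_append, if_true]
    · rw [outerA, if_neg h]
      have hle : tl.length ≤ c := by omega
      simp [List.take_of_length_le hle, List.drop_of_length_le hle]

-- strict countP inequality at a distinguishing member
lemma countP_strict {α : Type} (p q : α → Bool) (l : List α)
    (hmono : ∀ x ∈ l, q x = true → p x = true) (x : α) (hx : x ∈ l)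
    (hp : p x = true) (hq : q x = false) : l.countP q < l.countP p := by
  induction l with
  | nil => simp at hx
  | cons a l ih =>
    simp only [List.countP_cons]
    rcases List.mem_cons.mp hx with rfl | hx'
    · have hle : l.countP q ≤ l.countP p :=
        List.countP_mono_left (fun y hy => hmono y (List.mem_cons_of_mem _ hy))
      simp [hp, hq]
      omega
    · have hlt := ih (fun y hy => hmono y (List.mem_cons_of_mem _ hy)) hx'
      by_cases hqa : q a = true
      · simp [hqa, hmono a (List.mem_cons_self) hqa]
        omega
      · simp only [Bool.not_eq_true] at hqa
        simp [hqa]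
        split <;> omega

-- ===== VERDICT (by name: the statement is the Claim_ definition above) =====
theorem smallSentenceFilter_spec : Claim_unchanged_smallSentenceFilter := by
  intro tl length _ _ hD
  show outerA tl.length tl 0 length = tl.filter (keepB length)
  rw [outerA_eq length tl.length tl 0 (by omega)]
  simp only [List.take_zero, List.drop_zero, List.nil_append]
  refine List.filter_congr (fun t ht => ?_)
  refine keepA_eq_keepB length t ?_
  by_contra hb
  exact hD ⟨t, ht, by simpa using hb⟩

theorem smallSentenceFilter_changed : Claim_changed_smallSentenceFilter := by
  unfold Claim_changed_smallSentenceFilter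
  decide

theorem smallSentenceFilter_tight : Claim_exact_smallSentenceFilter := by
  intro tl length _ _ hD heq
  obtain ⟨t, ht, hb⟩ := hD
  obtain ⟨hA, hB⟩ := badT_keep length t hb
  unfold smallSentenceFilter smallSentenceFilter_alt at heq
  rw [outerA_eq length tl.length tl 0 (by omega)] at heq
  simp only [List.take_zero, List.drop_zero, List.nil_append] at heq
  have hlen : (tl.filter (keepA length)).length = (tl.filter (keepB length)).length := by
    rw [heq]
  rw [← List.countP_eq_length_filter, ← List.countP_eq_length_filter] at hlen
  have := countP_strict (keepA length) (keepB length) tl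
    (fun x hx => keepB_le_keepA length x) t ht hA hB
  omega
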